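-- pv_equiv track=rewrite | github.com/RINGCHEN/TradingAgents-Production-Complete | tradingagents/ecosystem/community_platform.py | get_user_level
-- ===== SOURCE A (Python) =====
-- from typing import Dict, List, Optional, Any, Union, Set, Tuple
--
-- def get_user_level(reputation_score: int) -> Tuple[str, int]:
--     """Get user level based on reputation score"""
--
--     levels = [
--         (0, "Newcomer", 1),
--         (100, "Contributor", 2),
--         (500, "Regular", 3),
--         (1500, "Expert", 4),
--         (5000, "Master", 5),
--         (15000, "Guru", 6),
--         (50000, "Legend", 7)
--     ]
--
--     for i, (threshold, level_name, level_num) in enumerate(levels):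
--         if reputation_score < threshold:
--             if i == 0:
--                 return level_name, level_num
--             prev_threshold, prev_name, prev_num = levels[i-1]
--             return prev_name, prev_num
--
--     return levels[-1][1], levels[-1][2]
-- ===== SOURCE B (Python) =====
-- import bisect
--
-- _THRESHOLDS = [0, 100, 500, 1500, 5000, 15000, 50000]
-- _NAMES = ["Newcomer", "Contributor", "Regular", "Expert", "Master", "Guru", "Legend"]
--
-- def get_user_level(reputation_score):
--     idx = bisect.bisect_right(_THRESHOLDS, reputation_score)
--     j = max(idx - 1, 0)
--     return _NAMES[j], j + 1
-- ===== Notes on version B (the rewrite author's own statement) =====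
-- stated objective: idiomatic
-- what changed: Replaces the linear enumerate-scan with previous-tier lookup by a bisect.bisect_right binary search over the threshold list with a single clamped index.
import Mathlib
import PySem

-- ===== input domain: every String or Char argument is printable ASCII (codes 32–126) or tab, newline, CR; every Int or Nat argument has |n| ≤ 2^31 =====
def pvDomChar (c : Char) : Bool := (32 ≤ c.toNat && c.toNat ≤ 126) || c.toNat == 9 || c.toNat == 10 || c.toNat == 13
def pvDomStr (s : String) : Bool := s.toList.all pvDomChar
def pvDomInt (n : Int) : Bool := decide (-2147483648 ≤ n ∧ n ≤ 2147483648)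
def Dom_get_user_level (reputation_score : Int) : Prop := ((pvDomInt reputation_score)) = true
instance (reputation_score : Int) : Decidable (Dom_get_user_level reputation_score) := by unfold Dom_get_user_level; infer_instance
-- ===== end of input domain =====

-- B replaces A's linear scan (with a lookup of the previous tier) by a binary search
-- (bisect_right) over the threshold list with a clamped index; idiomatic, same result.
-- ===== PORT A =====
def pvLevels : List (Int × String × Int) :=
  [(0, "Newcomer", 1), (100, "Contributor", 2), (500, "Regular", 3), (1500, "Expert", 4),
   (5000, "Master", 5), (15000, "Guru", 6), (50000, "Legend", 7)]

-- the for-loop over enumerate(levels) with its early returns; [] = loop fell through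
def pvLoopA (score : Int) : List (Int × Int × String × Int) → String × Int
  | [] => ((PySem.List.pyGetD pvLevels (-1) (0, "", 0)).2.1,
           (PySem.List.pyGetD pvLevels (-1) (0, "", 0)).2.2)
  | (i, threshold, level_name, level_num) :: rest =>
    if score < threshold then
      if i = 0 then (level_name, level_num)
      else
        match PySem.List.pyGet? pvLevels (i - 1) with
        | some (_, prev_name, prev_num) => (prev_name, prev_num)
        | none => ("", 0)  -- IndexError: unreachable, i > 0 here
    else pvLoopA score rest

def get_user_level (reputation_score : Int) : String × Int :=
  pvLoopA reputation_score (PySem.List.enumerate pvLevels)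

-- ===== PORT B =====
def pvThresholds : List Int := [0, 100, 500, 1500, 5000, 15000, 50000]
def pvNames : List String :=
  ["Newcomer", "Contributor", "Regular", "Expert", "Master", "Guru", "Legend"]

-- bisect.bisect_right: binary search, transliterated from CPython's lo/hi loop
def pvBisectRight (xs : List Int) (x : Int) (lo hi : Nat) : Nat :=
  if _h : lo < hi then
    let mid := (lo + hi) / 2
    if x < xs.getD mid 0 then pvBisectRight xs x lo mid
    else pvBisectRight xs x (mid + 1) hi
  else lo
termination_by hi - lo

def get_user_level_alt (reputation_score : Int) : String × Int :=
  let idx := pvBisectRight pvThresholds reputation_score 0 pvThresholds.length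
  let j : Int := max ((idx : Int) - 1) 0
  (pvNames.getD j.toNat "", j + 1)

-- ===== PRECONDITION & SPEC =====
def Spec_get_user_level (reputation_score : Int) (out : String × Int) : Prop := out = get_user_level_alt reputation_score
instance (reputation_score : Int) (out : String × Int) : Decidable (Spec_get_user_level reputation_score out) := by unfold Spec_get_user_level; infer_instance

-- ===== CLAIM (what is proved, stated in full; the proofs are below) =====
def Claim_equal_get_user_level : Prop := ∀ (reputation_score : Int), Dom_get_user_level reputation_score → Spec_get_user_level reputation_score (get_user_level reputation_score)

-- ===== LEMMAS AND PROOFS =====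

-- ===== VERDICT (by name: the statement is the Claim_ definition above) =====
theorem get_user_level_eq (n : Int) : get_user_level n = get_user_level_alt n := by
  unfold get_user_level get_user_level_alt
  rcases lt_or_ge n 0 with h | h
  · simp [pvLoopA, pvLevels, pvThresholds, pvNames, pvBisectRight, PySem.List.enumerate, h,
      show ¬ (0:Int) ≤ n by omega, show n < 100 by omega, show n < 500 by omega,
      show n < 1500 by omega]
  rcases lt_or_ge n 100 with h1 | h1
  · simp [pvLoopA, pvLevels, pvThresholds, pvNames, pvBisectRight, PySem.List.enumerate, h, h1,
      show ¬ n < 0 by omega, show n < 500 by omega, show n < 1500 by omega, PySem.List.pyGet?, PySem.List.pyIdx?]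
  rcases lt_or_ge n 500 with h2 | h2
  · simp [pvLoopA, pvLevels, pvThresholds, pvNames, pvBisectRight, PySem.List.enumerate, h2,
      show ¬ n < 0 by omega, show ¬ n < 100 by omega, show n < 1500 by omega, PySem.List.pyGet?, PySem.List.pyIdx?]
  rcases lt_or_ge n 1500 with h3 | h3
  · simp [pvLoopA, pvLevels, pvThresholds, pvNames, pvBisectRight, PySem.List.enumerate, h3,
      show ¬ n < 0 by omega, show ¬ n < 100 by omega, show ¬ n < 500 by omega, PySem.List.pyGet?, PySem.List.pyIdx?]
  rcases lt_or_ge n 5000 with h4 | h4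
  · simp [pvLoopA, pvLevels, pvThresholds, pvNames, pvBisectRight, PySem.List.enumerate, h4,
      show ¬ n < 0 by omega, show ¬ n < 100 by omega, show ¬ n < 500 by omega,
      show ¬ n < 1500 by omega, show n < 15000 by omega, PySem.List.pyGet?, PySem.List.pyIdx?]
  rcases lt_or_ge n 15000 with h5 | h5
  · simp [pvLoopA, pvLevels, pvThresholds, pvNames, pvBisectRight, PySem.List.enumerate, h5,
      show ¬ n < 0 by omega, show ¬ n < 100 by omega, show ¬ n < 500 by omega,
      show ¬ n < 1500 by omega, show ¬ n < 5000 by omega, PySem.List.pyGet?, PySem.List.pyIdx?]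
  rcases lt_or_ge n 50000 with h6 | h6
  · simp [pvLoopA, pvLevels, pvThresholds, pvNames, pvBisectRight, PySem.List.enumerate, h6,
      show ¬ n < 0 by omega, show ¬ n < 100 by omega, show ¬ n < 500 by omega,
      show ¬ n < 1500 by omega, show ¬ n < 5000 by omega, show ¬ n < 15000 by omega,
      PySem.List.pyGet?, PySem.List.pyIdx?]
  · simp [pvLoopA, pvLevels, pvThresholds, pvNames, pvBisectRight, PySem.List.enumerate,
      PySem.List.pyGetD, PySem.List.pyIdx?, PySem.List.pyGet?,
      show ¬ n < 0 by omega, show ¬ n < 100 by omega, show ¬ n < 500 by omega,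
      show ¬ n < 1500 by omega, show ¬ n < 5000 by omega, show ¬ n < 15000 by omega,
      show ¬ n < 50000 by omega]

theorem get_user_level_spec : Claim_equal_get_user_level := by
  intro n _
  exact get_user_level_eq n
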